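-- pv_equiv track=rewrite | github.com/Ravi-0412/Network-Lab-program | External_Q/append_even_parity_server.py | even_parity
-- ===== SOURCE A (Python) =====
-- def even_parity(n):
--     # to count the no of 1's we have to get the last bit
--     count=0
--     temp= n
--     # no of times this loop will execute that will give
--     # the no of '1'
--     while(n>0):
--         n= n & n-1
--         count+= 1
--     if count%2==1:
--         return 2*temp+1   # appending '1' at last in binary is =2*n+1
--     else:
--         return 2*temp       #appending '0' at last in binary is =2*n
-- ===== SOURCE B (Python) =====
-- def even_parity(n):
--     temp = n
--     parity = 0
--     while n > 0:
--         parity ^= n & 1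
--         n >>= 1
--     return 2 * temp + parity
-- ===== Notes on version B (the rewrite author's own statement) =====
-- stated objective: alternative
-- what changed: Replaces the Kernighan clear-lowest-set-bit counting loop (n &= n-1, count += 1, then count % 2) with a shift-and-XOR scan over all bit positions that maintains the running parity bit directly.
import Mathlib
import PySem

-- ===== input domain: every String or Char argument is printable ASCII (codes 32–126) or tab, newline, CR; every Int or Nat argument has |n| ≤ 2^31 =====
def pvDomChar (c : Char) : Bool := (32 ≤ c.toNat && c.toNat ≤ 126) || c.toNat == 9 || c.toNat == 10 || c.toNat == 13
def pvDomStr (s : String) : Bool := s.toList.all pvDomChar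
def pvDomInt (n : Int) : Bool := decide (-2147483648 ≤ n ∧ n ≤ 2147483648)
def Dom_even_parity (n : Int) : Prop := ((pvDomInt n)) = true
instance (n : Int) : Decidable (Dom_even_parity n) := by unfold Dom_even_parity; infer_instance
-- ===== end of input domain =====

-- B replaces A's clear-lowest-set-bit counting loop by a shift-and-XOR scan keeping the parity bit directly (alternative decomposition, same cost class).

-- ===== PORT A =====
-- while n > 0: n = n & (n-1); count += 1   (Kernighan loop; terminates since n & (n-1) < n for n > 0)
def kernCount (n count : Int) : Int :=
  if h : 0 < n then
    kernCount (PySem.Int.band n (n - 1)) (count + 1)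
  else count
termination_by n.toNat
decreasing_by
  have hn : n = ((n.toNat : Nat) : Int) := (Int.toNat_of_nonneg (le_of_lt h)).symm
  have h1 : (0:Int) ≤ n - 1 := by omega
  have : PySem.Int.band n (n - 1) = ((n.toNat &&& (n - 1).toNat : Nat) : Int) :=
    PySem.Int.band_of_nonneg (le_of_lt h) h1
  rw [this]
  have hle : n.toNat &&& (n - 1).toNat ≤ (n - 1).toNat := Nat.and_le_right
  simp only [Int.toNat_natCast]
  omega

def even_parity (n : Int) : Int :=
  if PySem.Int.mod (kernCount n 0) 2 = 1 then 2 * n + 1 else 2 * n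

-- ===== PORT B =====
-- while n > 0: parity ^= n & 1; n >>= 1
def scanParity (n parity : Int) : Int :=
  if h : 0 < n then
    scanParity (n >>> 1) (PySem.Int.bxor parity (PySem.Int.band n 1))
  else parity
termination_by n.toNat
decreasing_by
  have hn : n = ((n.toNat : Nat) : Int) := (Int.toNat_of_nonneg (le_of_lt h)).symm
  have : n >>> 1 = ((n.toNat >>> 1 : Nat) : Int) := by
    rw [hn]; exact_mod_cast rfl
  rw [this]
  simp only [Int.toNat_natCast]
  have h0 : 0 < n.toNat := by omega
  omega

def even_parity_alt (n : Int) : Int :=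
  2 * n + scanParity n 0

-- ===== PRECONDITION & SPEC =====
def Spec_even_parity (n : Int) (out : Int) : Prop := out = even_parity_alt n
instance (n : Int) (out : Int) : Decidable (Spec_even_parity n out) := by unfold Spec_even_parity; infer_instance

-- ===== CLAIM (what is proved, stated in full; the proofs are below) =====
def Claim_equal_even_parity : Prop := ∀ (n : Int), Dom_even_parity n → Spec_even_parity n (even_parity n)

-- ===== LEMMAS AND PROOFS =====

-- bit-parity of a Nat (0 or 1), by halving
def par (m : Nat) : Nat :=
  if m = 0 then 0 else (m % 2 + par (m / 2)) % 2
decreasing_by omega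

-- Kernighan step count of a Nat
def cnt (m : Nat) : Nat :=
  if h : m = 0 then 0 else cnt (m &&& (m - 1)) + 1
decreasing_by
  have hle : m &&& (m - 1) ≤ m - 1 := Nat.and_le_right
  omega

theorem par_le_one (m : Nat) : par m ≤ 1 := by
  unfold par; split <;> omega

theorem land_two_mul_add_one (k : Nat) : (2 * k + 1) &&& (2 * k) = 2 * k := by
  apply Nat.eq_of_testBit_eq; intro i
  simp only [Nat.testBit_land]
  cases i with
  | zero => simp
  | succ j =>
    have h1 : (2 * k + 1) / 2 = k := by omega
    have h2 : 2 * k / 2 = k := by omega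
    simp [Nat.testBit_succ, h1, h2]

theorem land_two_mul (k : Nat) (hk : 0 < k) :
    (2 * k) &&& (2 * k - 1) = 2 * (k &&& (k - 1)) := by
  apply Nat.eq_of_testBit_eq; intro i
  simp only [Nat.testBit_land]
  cases i with
  | zero => simp
  | succ j =>
    have h1 : 2 * k / 2 = k := by omega
    have h2 : (2 * k - 1) / 2 = k - 1 := by omega
    have h3 : 2 * (k &&& (k - 1)) / 2 = k &&& (k - 1) := by omega
    simp [Nat.testBit_succ, Nat.testBit_land, h1, h2, h3]

-- parity of the Kernighan count equals bit-parity
theorem par_two_mul (x : Nat) : par (2 * x) = par x := by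
  rcases Nat.eq_zero_or_pos x with h0 | h0
  · subst h0; simp
  · conv_lhs => rw [par]
    rw [if_neg (by omega : ¬ 2 * x = 0)]
    have e1 : 2 * x % 2 = 0 := by omega
    have e2 : 2 * x / 2 = x := by omega
    rw [e1, e2]
    have := par_le_one x
    omega

theorem par_odd (x : Nat) : par (2 * x + 1) = (1 + par x) % 2 := by
  conv_lhs => rw [par]
  rw [if_neg (by omega : ¬ 2 * x + 1 = 0)]
  have e1 : (2 * x + 1) % 2 = 1 := by omega
  have e2 : (2 * x + 1) / 2 = x := by omega
  rw [e1, e2]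

theorem cnt_mod_two (m : Nat) : cnt m % 2 = par m := by
  induction m using Nat.strong_induction_on with
  | _ m ih =>
    rcases Nat.eq_zero_or_pos m with hm | hm
    · subst hm; simp [cnt, par]
    rcases Nat.even_or_odd m with ⟨k, hk⟩ | ⟨k, hk⟩
    · -- m = 2k, k > 0
      have hm2 : m = 2 * k := by omega
      have hk0 : 0 < k := by omega
      have hstep : m &&& (m - 1) = 2 * (k &&& (k - 1)) := by
        rw [hm2]; exact land_two_mul k hk0
      have hland_le : k &&& (k - 1) ≤ k - 1 := Nat.and_le_right
      have e1 : cnt m = cnt (2 * (k &&& (k - 1))) + 1 := by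
        rw [cnt, dif_neg (by omega : ¬ m = 0), hstep]
      have e2 : cnt k = cnt (k &&& (k - 1)) + 1 := by
        rw [cnt, dif_neg (by omega : ¬ k = 0)]
      have ih1 : cnt (2 * (k &&& (k - 1))) % 2 = par (2 * (k &&& (k - 1))) :=
        ih _ (by omega)
      have ih2 : cnt (k &&& (k - 1)) % 2 = par (k &&& (k - 1)) := ih _ (by omega)
      have ih3 : cnt k % 2 = par k := ih _ (by omega)
      have hpar2 : par (2 * (k &&& (k - 1))) = par (k &&& (k - 1)) := par_two_mul _
      have hparm : par m = par k := by rw [hm2]; exact par_two_mul k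
      have := par_le_one (k &&& (k - 1))
      have := par_le_one k
      omega
    · -- m = 2k + 1
      have hstep : m &&& (m - 1) = 2 * k := by
        rw [hk]; simpa using land_two_mul_add_one k
      have e1 : cnt m = cnt (2 * k) + 1 := by
        rw [cnt, dif_neg (by omega : ¬ m = 0), hstep]
      have ih1 : cnt (2 * k) % 2 = par (2 * k) := ih _ (by omega)
      have hpar2 : par (2 * k) = par k := par_two_mul k
      have hparm : par m = (1 + par k) % 2 := by rw [hk]; exact par_odd k
      have := par_le_one k
      omega

theorem xor01 (x y : Nat) (hx : x ≤ 1) (hy : y ≤ 1) : x ^^^ y = (x + y) % 2 := by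
  interval_cases x <;> interval_cases y <;> decide

-- B's loop computes the bit-parity
theorem scanParity_eq (m p : Nat) (hp : p ≤ 1) :
    scanParity (m : Int) (p : Int) = (((p + par m) % 2 : Nat) : Int) := by
  induction m using Nat.strong_induction_on generalizing p with
  | _ m ih =>
    rcases Nat.eq_zero_or_pos m with hm | hm
    · subst hm
      rw [scanParity, par]
      simp
      omega
    · rw [scanParity]
      have hpos : (0:Int) < (m : Int) := by exact_mod_cast hm
      simp only [hpos, dif_pos]
      have hsh : ((m : Int)) >>> 1 = ((m >>> 1 : Nat) : Int) := by exact_mod_cast rfl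
      have hband : PySem.Int.band (m : Int) 1 = ((m &&& 1 : Nat) : Int) := by
        simpa using PySem.Int.band_natCast m 1
      have hbx : PySem.Int.bxor (p : Int) ((m &&& 1 : Nat) : Int) = ((p ^^^ (m &&& 1) : Nat) : Int) :=
        PySem.Int.bxor_natCast p (m &&& 1)
      rw [hsh, hband, hbx]
      have hm1 : m &&& 1 = m % 2 := Nat.and_one_is_mod m
      have hle : p ^^^ (m &&& 1) ≤ 1 := by
        rw [hm1, xor01 p (m % 2) hp (by omega)]; omega
      rw [ih (m >>> 1) (by omega) _ hle]
      have hdiv : m >>> 1 = m / 2 := by omega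
      congr 1
      rw [hdiv, hm1, xor01 p (m % 2) hp (by omega)]
      conv_rhs => rw [par, if_neg (by omega : ¬ m = 0)]
      have := par_le_one (m / 2)
      omega

-- A's loop counts Kernighan steps
theorem kernCount_eq (m : Nat) (c : Int) :
    kernCount (m : Int) c = c + ((cnt m : Nat) : Int) := by
  induction m using Nat.strong_induction_on generalizing c with
  | _ m ih =>
    rcases Nat.eq_zero_or_pos m with hm | hm
    · subst hm
      rw [kernCount, cnt]
      simp
    · rw [kernCount]
      have hpos : (0:Int) < (m : Int) := by exact_mod_cast hm
      simp only [hpos, dif_pos]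
      have h1 : ((m : Int)) - 1 = (((m - 1 : Nat)) : Int) := by omega
      have hband : PySem.Int.band (m : Int) ((m : Int) - 1) = ((m &&& (m - 1) : Nat) : Int) := by
        rw [h1]; exact PySem.Int.band_natCast m (m - 1)
      rw [hband]
      have hle : m &&& (m - 1) ≤ m - 1 := Nat.and_le_right
      rw [ih (m &&& (m - 1)) (by omega) (c + 1)]
      have : cnt m = cnt (m &&& (m - 1)) + 1 := by
        rw [cnt, dif_neg (by omega : ¬ m = 0)]
      rw [this]
      push_cast
      ring

theorem kernCount_nonpos (n c : Int) (h : ¬ 0 < n) : kernCount n c = c := by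
  rw [kernCount]; simp [h]

theorem scanParity_nonpos (n p : Int) (h : ¬ 0 < n) : scanParity n p = p := by
  rw [scanParity]; simp [h]

theorem mod_natCast_two (c : Nat) : PySem.Int.mod ((c : Nat) : Int) 2 = ((c % 2 : Nat) : Int) := by
  simp [PySem.Int.mod, Int.fmod_eq_emod]

-- ===== VERDICT (by name: the statement is the Claim_ definition above) =====
theorem even_parity_spec : Claim_equal_even_parity := by
  intro n _
  unfold Spec_even_parity even_parity even_parity_alt
  by_cases h : 0 < n
  · have hn : n = ((n.toNat : Nat) : Int) := (Int.toNat_of_nonneg (le_of_lt h)).symm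
    set m := n.toNat with hm
    rw [hn]
    rw [show kernCount ((m : Nat) : Int) 0 = ((cnt m : Nat) : Int) from by
      simpa using kernCount_eq m 0]
    have hs : scanParity ((m : Nat) : Int) 0 = ((par m : Nat) : Int) := by
      have hh := scanParity_eq m 0 (by omega)
      simp only [Nat.cast_zero] at hh
      rw [hh]
      have := par_le_one m
      congr 1
      omega
    rw [hs]
    rw [mod_natCast_two]
    have hc := cnt_mod_two m
    have hp := par_le_one m
    split_ifs with hif
    · have h1 : cnt m % 2 = 1 := by exact_mod_cast hif
      have h2 : par m = 1 := by omega
      rw [h2]; simp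
    · have h1 : cnt m % 2 ≠ 1 := by
        intro hcontra; exact hif (by exact_mod_cast hcontra)
      have h2 : par m = 0 := by omega
      rw [h2]; simp
  · rw [kernCount_nonpos n 0 h, scanParity_nonpos n 0 h]
    norm_num [PySem.Int.mod]
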